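-- pv_equiv track=rewrite | github.com/cpldcpu/GlowPoly | solver/poly_solver.py | is_solution_dc_only
-- ===== SOURCE A (Python) =====
-- def is_solution_dc_only(chosen_paths):
--     """
--     Check if a solution has only DC vertices (pure Anode or pure Cathode).
--     Returns True if fully DC, False if any alternating vertices exist.
--     """
--     from collections import defaultdict
--     vertex_roles = defaultdict(set)
--
--     # Analyze each path to determine vertex roles
--     for path in chosen_paths:
--         if len(path) >= 2:
--             start_vertex = path[0]
--             end_vertex = path[-1]
--             vertex_roles[start_vertex].add('start')
--             vertex_roles[end_vertex].add('end')
--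
--     # Check if any vertex has both roles (alternating)
--     for vertex, roles in vertex_roles.items():
--         if roles == {'start', 'end'}:
--             return False
--
--     return True
-- ===== SOURCE B (Python) =====
-- def is_solution_dc_only(chosen_paths):
--     return not any(
--         len(p) >= 2 and len(q) >= 2 and p[0] == q[-1]
--         for p in chosen_paths
--         for q in chosen_paths
--     )
-- ===== Notes on version B (the rewrite author's own statement) =====
-- stated objective: alternative
-- what changed: Drops A's defaultdict of role-sets and its verdict loop entirely: B does a brute-force pairwise existence check (is there a path starting where some path ends?) over all ordered pairs of paths, with no auxiliary data structure.
import Mathlib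
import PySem

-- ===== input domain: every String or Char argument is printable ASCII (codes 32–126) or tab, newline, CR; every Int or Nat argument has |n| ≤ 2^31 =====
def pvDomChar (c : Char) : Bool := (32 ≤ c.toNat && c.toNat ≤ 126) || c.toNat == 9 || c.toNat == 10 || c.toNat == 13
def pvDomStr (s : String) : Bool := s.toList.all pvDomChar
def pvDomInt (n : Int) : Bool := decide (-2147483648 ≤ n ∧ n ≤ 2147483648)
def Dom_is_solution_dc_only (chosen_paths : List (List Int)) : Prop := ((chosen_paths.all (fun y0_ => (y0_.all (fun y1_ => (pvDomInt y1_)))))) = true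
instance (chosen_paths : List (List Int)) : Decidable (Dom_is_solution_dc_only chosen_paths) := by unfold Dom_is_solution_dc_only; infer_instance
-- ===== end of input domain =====

-- B replaces A's defaultdict of role-sets plus a verdict loop by a brute-force pairwise check over all ordered pairs of paths, with no auxiliary data structure (objective: alternative).

-- ===== PORT A =====
-- one loop iteration of A: record 'start'/'end' roles of a path with >= 2 vertices
def pvStepA (d : PySem.Dict Int (PySem.Set String)) (path : List Int) : PySem.Dict Int (PySem.Set String) :=
  if 2 ≤ path.length then
    let start_vertex := PySem.List.pyGetD path 0 0
    let end_vertex := PySem.List.pyGetD path (-1) 0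
    let d1 := d.insert start_vertex (PySem.Set.add (d.getD start_vertex PySem.Set.empty) "start")
    d1.insert end_vertex (PySem.Set.add (d1.getD end_vertex PySem.Set.empty) "end")
  else d

def is_solution_dc_only (chosen_paths : List (List Int)) : Bool :=
  let vertex_roles := chosen_paths.foldl pvStepA PySem.Dict.empty
  -- second loop: return False on the first vertex whose role set equals {'start','end'}
  if vertex_roles.items.any (fun p => PySem.Set.equal p.2 (PySem.Set.ofList ["start", "end"])) then
    false
  else
    true

-- ===== PORT B =====
def is_solution_dc_only_alt (chosen_paths : List (List Int)) : Bool :=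
  !(chosen_paths.any (fun p => chosen_paths.any (fun q =>
      decide (2 ≤ p.length) && decide (2 ≤ q.length) &&
      (PySem.List.pyGetD p 0 0 == PySem.List.pyGetD q (-1) 0))))

-- ===== PRECONDITION & SPEC =====
def Spec_is_solution_dc_only (chosen_paths : List (List Int)) (out : Bool) : Prop := out = is_solution_dc_only_alt chosen_paths
instance (chosen_paths : List (List Int)) (out : Bool) : Decidable (Spec_is_solution_dc_only chosen_paths out) := by unfold Spec_is_solution_dc_only; infer_instance

-- ===== CLAIM (what is proved, stated in full; the proofs are below) =====
def Claim_equal_is_solution_dc_only : Prop := ∀ (chosen_paths : List (List Int)), Dom_is_solution_dc_only chosen_paths → Spec_is_solution_dc_only chosen_paths (is_solution_dc_only chosen_paths)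

-- ===== LEMMAS AND PROOFS =====

-- start vertices / end vertices of the long (length >= 2) paths of a list
def pvStarts (l : List (List Int)) : List Int :=
  (l.filter (fun p => 2 ≤ p.length)).map (fun p => PySem.List.pyGetD p 0 0)
def pvEnds (l : List (List Int)) : List Int :=
  (l.filter (fun p => 2 ≤ p.length)).map (fun p => PySem.List.pyGetD p (-1) 0)

-- invariant carried through A's first loop
def pvInv (d : PySem.Dict Int (PySem.Set String)) (ss es : List Int) : Prop :=
  d.keys.Nodup ∧
  ∀ v : Int, ("start" ∈ d.getD v PySem.Set.empty ↔ v ∈ ss) ∧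
             ("end" ∈ d.getD v PySem.Set.empty ↔ v ∈ es) ∧
             (∀ r ∈ d.getD v PySem.Set.empty, r = "start" ∨ r = "end")

theorem pvStarts_cons (p : List Int) (l : List (List Int)) :
    pvStarts (p :: l) = (if 2 ≤ p.length then [PySem.List.pyGetD p 0 0] else []) ++ pvStarts l := by
  simp [pvStarts]; split_ifs <;> simp_all

theorem pvEnds_cons (p : List Int) (l : List (List Int)) :
    pvEnds (p :: l) = (if 2 ≤ p.length then [PySem.List.pyGetD p (-1) 0] else []) ++ pvEnds l := by
  simp [pvEnds]; split_ifs <;> simp_all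

theorem pvInv_step (d : PySem.Dict Int (PySem.Set String)) (ss es : List Int) (p : List Int)
    (h : pvInv d ss es) :
    pvInv (pvStepA d p) (ss ++ (if 2 ≤ p.length then [PySem.List.pyGetD p 0 0] else []))
      (es ++ (if 2 ≤ p.length then [PySem.List.pyGetD p (-1) 0] else [])) := by
  obtain ⟨hnd, hmem⟩ := h
  by_cases hl : 2 ≤ p.length
  · rw [if_pos hl, if_pos hl]
    unfold pvStepA
    rw [if_pos hl]
    set s := PySem.List.pyGetD p 0 0 with hs
    set e := PySem.List.pyGetD p (-1) 0 with he
    set d1 := d.insert s (PySem.Set.add (d.getD s PySem.Set.empty) "start") with hd1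
    set d2 := d1.insert e (PySem.Set.add (d1.getD e PySem.Set.empty) "end") with hd2
    have hg1 : ∀ v, d1.getD v PySem.Set.empty =
        if v = s then PySem.Set.add (d.getD s PySem.Set.empty) "start" else d.getD v PySem.Set.empty :=
      fun v => PySem.Dict.getD_insert d s v _ _
    have hg2 : ∀ v, d2.getD v PySem.Set.empty =
        if v = e then PySem.Set.add (d1.getD e PySem.Set.empty) "end" else d1.getD v PySem.Set.empty :=
      fun v => PySem.Dict.getD_insert d1 e v _ _
    have key : ∀ (v : Int) (r : String), r ∈ d2.getD v PySem.Set.empty ↔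
        (r ∈ d.getD v PySem.Set.empty ∨ (v = s ∧ r = "start") ∨ (v = e ∧ r = "end")) := by
      intro v r
      rw [hg2 v]
      by_cases hve : v = e
      · rw [if_pos hve, PySem.Set.mem_add, hg1 e]
        by_cases hes : e = s
        · rw [if_pos hes, PySem.Set.mem_add]
          rw [hve, hes]
          tauto
        · rw [if_neg hes, hve]
          have : ¬ (e = s) := hes
          tauto
      · rw [if_neg hve, hg1 v]
        by_cases hvs : v = s
        · rw [if_pos hvs, PySem.Set.mem_add, hvs]
          have : ¬ (s = e) := fun h => hve (hvs.trans h)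
          tauto
        · rw [if_neg hvs]
          tauto
    refine ⟨PySem.Dict.nodup_keys_insert _ _ _ (PySem.Dict.nodup_keys_insert _ _ _ hnd), ?_⟩
    intro v
    obtain ⟨h1, h2, h3⟩ := hmem v
    have hse : ("start" : String) ≠ "end" := by decide
    refine ⟨?_, ?_, ?_⟩
    · rw [key v "start"]
      simp only [List.mem_append, List.mem_singleton]
      constructor
      · rintro (hin | ⟨hv, _⟩ | ⟨_, habs⟩)
        · exact Or.inl (h1.mp hin)
        · exact Or.inr hv
        · exact absurd habs.symm hse.symm
      · rintro (hin | hv)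
        · exact Or.inl (h1.mpr hin)
        · exact Or.inr (Or.inl ⟨hv, by trivial⟩)
    · rw [key v "end"]
      simp only [List.mem_append, List.mem_singleton]
      constructor
      · rintro (hin | ⟨_, habs⟩ | ⟨hv, _⟩)
        · exact Or.inl (h2.mp hin)
        · exact absurd habs hse.symm
        · exact Or.inr hv
      · rintro (hin | hv)
        · exact Or.inl (h2.mpr hin)
        · exact Or.inr (Or.inr ⟨hv, by trivial⟩)
    · intro r hr
      rcases (key v r).mp hr with hin | ⟨_, hr'⟩ | ⟨_, hr'⟩
      · exact h3 r hin
      · exact Or.inl hr'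
      · exact Or.inr hr'
  · rw [if_neg hl, if_neg hl]
    simpa [pvStepA, if_neg hl] using ⟨hnd, hmem⟩

theorem pvInv_foldl (l : List (List Int)) (d : PySem.Dict Int (PySem.Set String)) (ss es : List Int)
    (h : pvInv d ss es) :
    pvInv (l.foldl pvStepA d) (ss ++ pvStarts l) (es ++ pvEnds l) := by
  induction l generalizing d ss es with
  | nil => simpa [pvStarts, pvEnds] using h
  | cons p l ih =>
    have := ih (pvStepA d p) _ _ (pvInv_step d ss es p h)
    simpa [pvStarts_cons, pvEnds_cons] using this

theorem pvInv_main (l : List (List Int)) :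
    pvInv (l.foldl pvStepA PySem.Dict.empty) (pvStarts l) (pvEnds l) := by
  have h0 : pvInv PySem.Dict.empty [] [] := by
    refine ⟨by simp [PySem.Dict.keys_empty], ?_⟩
    intro v; simp [PySem.Dict.getD_empty, PySem.Set.empty]
  simpa using pvInv_foldl l PySem.Dict.empty [] [] h0

theorem pvAny_iff (l : List (List Int)) :
    ((l.foldl pvStepA PySem.Dict.empty).items.any
        (fun p => PySem.Set.equal p.2 (PySem.Set.ofList ["start", "end"])) = true)
      ↔ ∃ v : Int, v ∈ pvStarts l ∧ v ∈ pvEnds l := by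
  obtain ⟨hnd, hmem⟩ := pvInv_main l
  set d := l.foldl pvStepA PySem.Dict.empty with hd
  rw [List.any_eq_true]
  constructor
  · rintro ⟨⟨k, roles⟩, hp, heq⟩
    have hget : d.getD k PySem.Set.empty = roles :=
      PySem.Dict.getD_of_mem_items d hp hnd PySem.Set.empty
    have hiff := (PySem.Set.equal_iff _ _).mp heq
    obtain ⟨h1, h2, _⟩ := hmem k
    refine ⟨k, ?_, ?_⟩
    · exact h1.mp (by rw [hget]; exact (hiff "start").mpr (by simp [PySem.Set.mem_ofList]))
    · exact h2.mp (by rw [hget]; exact (hiff "end").mpr (by simp [PySem.Set.mem_ofList]))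
  · rintro ⟨v, hvs, hve⟩
    obtain ⟨h1, h2, h3⟩ := hmem v
    have hstart : "start" ∈ d.getD v PySem.Set.empty := h1.mpr hvs
    have hcont : d.contains v = true := by
      by_contra hc
      have : d.getD v PySem.Set.empty = PySem.Set.empty :=
        PySem.Dict.getD_of_not_contains d _ (by simpa using hc)
      rw [this] at hstart
      simp [PySem.Set.empty] at hstart
    have hk : v ∈ d.keys := (PySem.Dict.contains_iff_mem_keys d v).mp hcont
    obtain ⟨q, hq, hq1⟩ : ∃ q ∈ d.items, q.1 = v := by
      simpa [PySem.Dict.keys, List.mem_map] using hk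
    obtain ⟨k, roles⟩ := q
    simp only at hq1
    subst hq1
    have hget : d.getD k PySem.Set.empty = roles :=
      PySem.Dict.getD_of_mem_items d hq hnd PySem.Set.empty
    refine ⟨(k, roles), hq, ?_⟩
    rw [PySem.Set.equal_iff]
    intro x
    rw [← hget]
    constructor
    · intro hx
      rcases h3 x hx with h | h <;> simp [PySem.Set.mem_ofList, h]
    · intro hx
      have : x = "start" ∨ x = "end" := by
        simpa [PySem.Set.mem_ofList] using hx
      rcases this with h | h
      · rw [h]; exact hstart
      · rw [h]; exact h2.mpr hve

-- B's nested any = true exactly when some vertex is both a start and an end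
theorem pvPair_iff (l : List (List Int)) :
    (l.any (fun p => l.any (fun q =>
        decide (2 ≤ p.length) && decide (2 ≤ q.length) &&
        (PySem.List.pyGetD p 0 0 == PySem.List.pyGetD q (-1) 0))) = true)
      ↔ ∃ v : Int, v ∈ pvStarts l ∧ v ∈ pvEnds l := by
  simp only [List.any_eq_true, Bool.and_eq_true, decide_eq_true_eq, beq_iff_eq,
    pvStarts, pvEnds, List.mem_map, List.mem_filter]
  constructor
  · rintro ⟨p, hp, q, hq, ⟨hlp, hlq⟩, heq⟩
    exact ⟨PySem.List.pyGetD p 0 0, ⟨p, ⟨hp, by simpa using hlp⟩, rfl⟩,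
           ⟨q, ⟨hq, by simpa using hlq⟩, heq.symm⟩⟩
  · rintro ⟨v, ⟨p, ⟨hp, hlp⟩, hps⟩, ⟨q, ⟨hq, hlq⟩, hqe⟩⟩
    exact ⟨p, hp, q, hq, ⟨by simpa using hlp, by simpa using hlq⟩, by rw [hps, hqe]⟩

-- ===== VERDICT (by name: the statement is the Claim_ definition above) =====
theorem is_solution_dc_only_spec : Claim_equal_is_solution_dc_only := by
  intro l _
  unfold Spec_is_solution_dc_only is_solution_dc_only is_solution_dc_only_alt
  rw [show (fun p : List Int => l.any (fun q =>
        decide (2 ≤ p.length) && decide (2 ≤ q.length) &&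
        (PySem.List.pyGetD p 0 0 == PySem.List.pyGetD q (-1) 0))) = _ from rfl]
  by_cases hex : ∃ v : Int, v ∈ pvStarts l ∧ v ∈ pvEnds l
  · rw [if_pos ((pvAny_iff l).mpr hex), (pvPair_iff l).mpr hex]
    rfl
  · have hA : ¬ ((l.foldl pvStepA PySem.Dict.empty).items.any
        (fun p => PySem.Set.equal p.2 (PySem.Set.ofList ["start", "end"])) = true) :=
      fun h => hex ((pvAny_iff l).mp h)
    have hB : (l.any (fun p => l.any (fun q =>
        decide (2 ≤ p.length) && decide (2 ≤ q.length) &&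
        (PySem.List.pyGetD p 0 0 == PySem.List.pyGetD q (-1) 0)))) = false := by
      cases hb : (l.any (fun p => l.any (fun q =>
          decide (2 ≤ p.length) && decide (2 ≤ q.length) &&
          (PySem.List.pyGetD p 0 0 == PySem.List.pyGetD q (-1) 0)))) with
      | true => exact absurd ((pvPair_iff l).mp hb) hex
      | false => rfl
    rw [if_neg hA, hB]
    rfl
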